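-- pv_equiv track=rewrite | github.com/suyash-lyzr/hackathon-evaluation | backend/parser.py | _canonicalize_header
-- ===== SOURCE A (Python) =====
-- COLUMN_ALIASES = {
--     "team_name":       ["team name", "team", "team_name"],
--     "project_title":   ["project title", "project", "title", "project_title"],
--     "elevator_pitch":  ["short elevator pitch (3-4 liners)", "elevator pitch", "pitch", "short elevator pitch", "elevator_pitch"],
--     "live_url":        ["live deployed url", "live url", "deployed url", "url", "live_url"],
--     "app_id":          ["app id", "app_id", "appid", "app id:", "architect app id"],
--     "pain_point":      ["what specific \"pain point\" does this solve?", "pain point", "what specific 'pain point' does this solve?", "pain_point", "what pain point does this solve"],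
--     "primary_user":    ["who is the primary user?", "primary user", "primary_user", "target user", "user"],
--     "impact":          ["quantify the impact", "impact", "business impact", "impact:", "quantify the impact:"],
--     "loom_video":      ["loom video", "loom", "loom_video", "video"],
-- }
--
-- def _canonicalize_header(raw: str) -> str | None:
--     if not raw:
--         return None
--     key = str(raw).strip().lower().rstrip(":").strip()
--     for canon, aliases in COLUMN_ALIASES.items():
--         if key in [a.lower() for a in aliases]:
--             return canon
--         if key == canon:
--             return canon
--     return None
-- ===== SOURCE B (Python) =====
-- # Hand-written reverse index: each lowered header variant maps directly to its
-- # canonical column name. One dict lookup per call instead of scanning groups.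
-- _HEADER_MAP = {
--     "team name": "team_name",
--     "team": "team_name",
--     "team_name": "team_name",
--     "project title": "project_title",
--     "project": "project_title",
--     "title": "project_title",
--     "project_title": "project_title",
--     "short elevator pitch (3-4 liners)": "elevator_pitch",
--     "elevator pitch": "elevator_pitch",
--     "pitch": "elevator_pitch",
--     "short elevator pitch": "elevator_pitch",
--     "elevator_pitch": "elevator_pitch",
--     "live deployed url": "live_url",
--     "live url": "live_url",
--     "deployed url": "live_url",
--     "url": "live_url",
--     "live_url": "live_url",
--     "app id": "app_id",
--     "app_id": "app_id",
--     "appid": "app_id",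
--     "app id:": "app_id",
--     "architect app id": "app_id",
--     'what specific "pain point" does this solve?': "pain_point",
--     "pain point": "pain_point",
--     "what specific 'pain point' does this solve?": "pain_point",
--     "pain_point": "pain_point",
--     "what pain point does this solve": "pain_point",
--     "who is the primary user?": "primary_user",
--     "primary user": "primary_user",
--     "primary_user": "primary_user",
--     "target user": "primary_user",
--     "user": "primary_user",
--     "quantify the impact": "impact",
--     "impact": "impact",
--     "business impact": "impact",
--     "impact:": "impact",
--     "quantify the impact:": "impact",
--     "loom video": "loom_video",
--     "loom": "loom_video",
--     "loom_video": "loom_video",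
--     "video": "loom_video",
-- }
--
--
-- def _canonicalize_header(raw: str) -> str | None:
--     if not raw:
--         return None
--     key = str(raw).strip().lower().rstrip(":").strip()
--     return _HEADER_MAP.get(key)
-- ===== Notes on version B (the rewrite author's own statement) =====
-- stated objective: simpler
-- what changed: Replaces the per-call scan over grouped COLUMN_ALIASES (inner lowered-alias list rebuilt each iteration) by a hand-written flat reverse dict mapping each lowered header variant to its canonical name, so the function body is one dict lookup; correct because no lowered alias occurs under two canons and every canonical name already appears among its own lowered aliases.
import Mathlib
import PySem

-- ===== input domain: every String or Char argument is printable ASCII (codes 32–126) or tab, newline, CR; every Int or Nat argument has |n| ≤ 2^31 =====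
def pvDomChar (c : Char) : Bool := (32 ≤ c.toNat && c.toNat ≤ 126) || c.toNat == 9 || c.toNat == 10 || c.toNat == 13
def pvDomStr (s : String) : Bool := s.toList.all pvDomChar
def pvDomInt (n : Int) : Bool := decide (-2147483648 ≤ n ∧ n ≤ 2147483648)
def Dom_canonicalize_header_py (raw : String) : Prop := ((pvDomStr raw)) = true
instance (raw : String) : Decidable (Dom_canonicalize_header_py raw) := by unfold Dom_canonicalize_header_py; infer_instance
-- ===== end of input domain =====

-- B replaces A's per-call scan over the grouped COLUMN_ALIASES by a hand-written flat reverse dict (one lookup per call; simpler body).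

-- shared helper: hand port of s.rstrip(":"), exact since the strip set is the single character ':'
def pvRstripColon (s : String) : String :=
  String.ofList ((s.toList.reverse.dropWhile (· == ':')).reverse)

-- ===== PORT A =====
-- module constant COLUMN_ALIASES (insertion order)
def pvColumnAliases : List (String × List String) :=
  [("team_name",      ["team name", "team", "team_name"]),
   ("project_title",  ["project title", "project", "title", "project_title"]),
   ("elevator_pitch", ["short elevator pitch (3-4 liners)", "elevator pitch", "pitch", "short elevator pitch", "elevator_pitch"]),
   ("live_url",       ["live deployed url", "live url", "deployed url", "url", "live_url"]),
   ("app_id",         ["app id", "app_id", "appid", "app id:", "architect app id"]),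
   ("pain_point",     ["what specific \"pain point\" does this solve?", "pain point", "what specific 'pain point' does this solve?", "pain_point", "what pain point does this solve"]),
   ("primary_user",   ["who is the primary user?", "primary user", "primary_user", "target user", "user"]),
   ("impact",         ["quantify the impact", "impact", "business impact", "impact:", "quantify the impact:"]),
   ("loom_video",     ["loom video", "loom", "loom_video", "video"])]

-- the for-loop over COLUMN_ALIASES.items()
def pvAliasScan (key : String) : List (String × List String) → Option String
  | [] => none
  | (canon, aliases) :: rest =>
    if key ∈ aliases.map PySem.Str.lower then some canon
    else if key = canon then some canon
    else pvAliasScan key rest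

def canonicalize_header_py (raw : String) : Option String :=
  if raw = "" then none
  else pvAliasScan (PySem.Str.strip (pvRstripColon (PySem.Str.lower (PySem.Str.strip raw)))) pvColumnAliases

-- ===== PORT B =====
-- module constant _HEADER_MAP: the hand-written flat reverse dict literal of Source B
def pvHeaderMap : PySem.Dict String String := PySem.Dict.mk
  [("team name", "team_name"), ("team", "team_name"), ("team_name", "team_name"),
   ("project title", "project_title"), ("project", "project_title"), ("title", "project_title"), ("project_title", "project_title"),
   ("short elevator pitch (3-4 liners)", "elevator_pitch"), ("elevator pitch", "elevator_pitch"), ("pitch", "elevator_pitch"),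
   ("short elevator pitch", "elevator_pitch"), ("elevator_pitch", "elevator_pitch"),
   ("live deployed url", "live_url"), ("live url", "live_url"), ("deployed url", "live_url"), ("url", "live_url"), ("live_url", "live_url"),
   ("app id", "app_id"), ("app_id", "app_id"), ("appid", "app_id"), ("app id:", "app_id"), ("architect app id", "app_id"),
   ("what specific \"pain point\" does this solve?", "pain_point"), ("pain point", "pain_point"),
   ("what specific 'pain point' does this solve?", "pain_point"), ("pain_point", "pain_point"),
   ("what pain point does this solve", "pain_point"),
   ("who is the primary user?", "primary_user"), ("primary user", "primary_user"), ("primary_user", "primary_user"),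
   ("target user", "primary_user"), ("user", "primary_user"),
   ("quantify the impact", "impact"), ("impact", "impact"), ("business impact", "impact"),
   ("impact:", "impact"), ("quantify the impact:", "impact"),
   ("loom video", "loom_video"), ("loom", "loom_video"), ("loom_video", "loom_video"), ("video", "loom_video")]

def canonicalize_header_py_alt (raw : String) : Option String :=
  if raw = "" then none
  else pvHeaderMap.get? (PySem.Str.strip (pvRstripColon (PySem.Str.lower (PySem.Str.strip raw))))

-- ===== PRECONDITION & SPEC =====
def Spec_canonicalize_header_py (raw : String) (out : Option String) : Prop := out = canonicalize_header_py_alt raw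
instance (raw : String) (out : Option String) : Decidable (Spec_canonicalize_header_py raw out) := by unfold Spec_canonicalize_header_py; infer_instance

-- ===== CLAIM (what is proved, stated in full; the proofs are below) =====
def Claim_equal_canonicalize_header_py : Prop := ∀ (raw : String), Dom_canonicalize_header_py raw → Spec_canonicalize_header_py raw (canonicalize_header_py raw)

-- ===== LEMMAS AND PROOFS =====

-- B's dict is a literal with pairwise-distinct keys, so get? is first-match lookup on its items
theorem pvGet?_mk_eq_lookup (l : List (String × String)) (key : String) :
    (PySem.Dict.mk l).get? key = l.lookup key := by
  induction l with
  | nil => simp [PySem.Dict.get?]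
  | cons p rest ih =>
    obtain ⟨k, v⟩ := p
    rw [PySem.Dict.get?_mk_cons]
    by_cases h : key = k
    · simp [List.lookup, h]
    · simp [List.lookup, Ne.symm h, beq_eq_false_iff_ne.mpr h, ih]

theorem pvLookup_map_const (l : List String) (c key : String) :
    (l.map (fun a => (a, c))).lookup key = if key ∈ l then some c else none := by
  induction l with
  | nil => simp
  | cons a rest ih =>
    by_cases h : key = a
    · simp [h]
    · simp [List.lookup, beq_eq_false_iff_ne.mpr h, h, ih]

theorem pvLookup_append (l₁ l₂ : List (String × String)) (key : String) :
    (l₁ ++ l₂).lookup key = ((l₁.lookup key).or (l₂.lookup key)) := by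
  induction l₁ with
  | nil => simp
  | cons p rest ih =>
    obtain ⟨k, v⟩ := p
    by_cases h : (key == k) = true <;> simp [List.lookup, h, ih]

-- A's grouped scan equals first-match lookup on the flattened reverse pairs,
-- provided each canonical name already occurs among its own lowered aliases
theorem pvScan_eq_lookup_flat (key : String) (table : List (String × List String))
    (hcanon : ∀ p ∈ table, p.1 ∈ p.2.map PySem.Str.lower) :
    pvAliasScan key table
      = (table.flatMap (fun p => (p.2.map PySem.Str.lower).map (fun a => (a, p.1)))).lookup key := by
  induction table with
  | nil => simp [pvAliasScan]
  | cons p rest ih =>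
    obtain ⟨canon, aliases⟩ := p
    have hc : canon ∈ aliases.map PySem.Str.lower := hcanon _ (List.mem_cons_self ..)
    rw [List.flatMap_cons, pvLookup_append, pvLookup_map_const,
        ← ih (fun q hq => hcanon q (List.mem_cons_of_mem _ hq))]
    by_cases hmem : key ∈ aliases.map PySem.Str.lower
    · simp [pvAliasScan, hmem]
    · have hne : key ≠ canon := fun h => hmem (h ▸ hc)
      simp [pvAliasScan, hmem, hne]

-- the flattened reverse pairs of COLUMN_ALIASES are exactly B's hand-written dict items
theorem pvFlat_eq_headerMap :
    (pvColumnAliases.flatMap (fun p => (p.2.map PySem.Str.lower).map (fun a => (a, p.1))))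
      = pvHeaderMap.items := by decide

-- ===== VERDICT (by name: the statement is the Claim_ definition above) =====
theorem canonicalize_header_py_spec : Claim_equal_canonicalize_header_py := by
  intro raw _
  unfold Spec_canonicalize_header_py canonicalize_header_py canonicalize_header_py_alt
  by_cases h : raw = ""
  · simp [h]
  · simp only [h, if_false]
    rw [pvScan_eq_lookup_flat _ _ (by decide), pvFlat_eq_headerMap, pvGet?_mk_eq_lookup]
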